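-- pv_equiv track=rewrite | github.com/sebastian-griego/auto | harness/src/autoform_eval/validate.py | _contains_top_level_bool_connective
-- ===== SOURCE A (Python) =====
-- BOOL_CONNECTIVES = ("&&", "||")
--
-- def _contains_top_level_bool_connective(expr: str) -> bool:
--     depth = 0
--     idx = 0
--     while idx < len(expr):
--         ch = expr[idx]
--         if ch == "(":
--             depth += 1
--             idx += 1
--             continue
--         if ch == ")":
--             if depth > 0:
--                 depth -= 1
--             idx += 1
--             continue
--         if depth == 0 and idx + 1 < len(expr) and expr[idx : idx + 2] in BOOL_CONNECTIVES:
--             return True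
--         idx += 1
--     return False
-- ===== SOURCE B (Python) =====
-- BOOL_CONNECTIVES = ("&&", "||")
--
-- def _contains_top_level_bool_connective(expr: str) -> bool:
--     # Pass 1: depths[i] = parenthesis depth just before character i (clamped at 0).
--     depths = []
--     depth = 0
--     for ch in expr:
--         depths.append(depth)
--         if ch == "(":
--             depth += 1
--         elif ch == ")" and depth > 0:
--             depth -= 1
--     # Pass 2: look for a connective starting at a depth-0 position.
--     return any(depths[i] == 0 and expr[i:i + 2] in BOOL_CONNECTIVES
--                for i in range(len(expr) - 1))
-- ===== Notes on version B (the rewrite author's own statement) =====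
-- stated objective: alternative
-- what changed: Replaces A's single interleaved index-driven scan (mutable depth + early return) with two separate passes: first a prefix list of parenthesis depths built by iterating over the characters, then a scan for a connective pair at a depth-0 position.
import Mathlib
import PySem

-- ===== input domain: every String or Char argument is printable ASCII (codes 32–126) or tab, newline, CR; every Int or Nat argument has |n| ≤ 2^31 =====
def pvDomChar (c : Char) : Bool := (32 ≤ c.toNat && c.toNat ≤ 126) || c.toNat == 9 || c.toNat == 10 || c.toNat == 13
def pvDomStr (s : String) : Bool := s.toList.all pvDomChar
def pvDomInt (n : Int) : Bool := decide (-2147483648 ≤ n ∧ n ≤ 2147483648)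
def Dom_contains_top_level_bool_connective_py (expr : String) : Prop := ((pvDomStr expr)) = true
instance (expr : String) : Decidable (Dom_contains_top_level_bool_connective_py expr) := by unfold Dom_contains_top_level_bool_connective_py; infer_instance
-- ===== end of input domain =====

-- ===== PORT A =====
-- A: one interleaved scan, tracking depth while checking for a top-level "&&"/"||".
-- pvPairA c rest transliterates "idx + 1 < len(expr) and expr[idx:idx+2] in BOOL_CONNECTIVES".
def pvPairA (c : Char) (rest : List Char) : Bool :=
  match rest with
  | c2 :: _ => (c == '&' && c2 == '&') || (c == '|' && c2 == '|')
  | [] => false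

def pvLoopA : List Char → Nat → Bool
  | [], _ => false
  | c :: rest, depth =>
    if c = '(' then pvLoopA rest (depth + 1)
    else if c = ')' then pvLoopA rest (if depth > 0 then depth - 1 else depth)
    else if depth == 0 && pvPairA c rest then true
    else pvLoopA rest depth

def contains_top_level_bool_connective_py (expr : String) : Bool :=
  pvLoopA expr.toList 0

-- ===== PORT B =====
-- B: two separate passes — first the prefix list of depths, then a scan for a
-- connective pair at a depth-0 position.
def pvNextDepthB (c : Char) (depth : Nat) : Nat :=
  if c = '(' then depth + 1
  else if c = ')' && depth > 0 then depth - 1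
  else depth

-- Pass 1: depths[i] = parenthesis depth just before character i.
def pvDepthsB : List Char → Nat → List Nat
  | [], _ => []
  | c :: rest, depth => depth :: pvDepthsB rest (pvNextDepthB c depth)

def pvIsPairB (c c2 : Char) : Bool :=
  (c == '&' && c2 == '&') || (c == '|' && c2 == '|')

-- Pass 2: walk depths and characters in parallel, checking each adjacent pair.
def pvScanB : List Nat → List Char → Bool
  | d :: ds, c :: c2 :: rest => (d == 0 && pvIsPairB c c2) || pvScanB ds (c2 :: rest)
  | _, _ => false

def contains_top_level_bool_connective_py_alt (expr : String) : Bool :=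
  pvScanB (pvDepthsB expr.toList 0) expr.toList

-- ===== PRECONDITION & SPEC =====
def Spec_contains_top_level_bool_connective_py (expr : String) (out : Bool) : Prop := out = contains_top_level_bool_connective_py_alt expr
instance (expr : String) (out : Bool) : Decidable (Spec_contains_top_level_bool_connective_py expr out) := by unfold Spec_contains_top_level_bool_connective_py; infer_instance

-- ===== CLAIM (what is proved, stated in full; the proofs are below) =====
def Claim_equal_contains_top_level_bool_connective_py : Prop := ∀ (expr : String), Dom_contains_top_level_bool_connective_py expr → Spec_contains_top_level_bool_connective_py expr (contains_top_level_bool_connective_py expr)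

-- ===== LEMMAS AND PROOFS =====
theorem pv_loop_eq_scan (l : List Char) (d : Nat) :
    pvLoopA l d = pvScanB (pvDepthsB l d) l := by
  induction l generalizing d with
  | nil => rfl
  | cons c rest ih =>
    cases rest with
    | nil =>
      by_cases hc1 : c = '(' <;> by_cases hc2 : c = ')' <;>
        simp_all [pvLoopA, pvDepthsB, pvScanB, pvPairA]
    | cons c2 rest' =>
      have hstep : pvScanB (pvDepthsB (c :: c2 :: rest') d) (c :: c2 :: rest')
          = ((d == 0 && pvIsPairB c c2)
              || pvScanB (pvDepthsB (c2 :: rest') (pvNextDepthB c d)) (c2 :: rest')) := rfl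
      rw [hstep, ← ih]
      by_cases h1 : c = '('
      · subst h1
        simp [pvLoopA, pvNextDepthB, pvIsPairB]
      · by_cases h2 : c = ')'
        · subst h2
          by_cases hd : 0 < d <;>
            simp [pvLoopA, pvNextDepthB, pvIsPairB, hd]
        · have hnext : pvNextDepthB c d = d := by simp [pvNextDepthB, h1, h2]
          rw [hnext]
          have hpair : pvPairA c (c2 :: rest') = pvIsPairB c c2 := rfl
          simp only [pvLoopA, if_neg h1, if_neg h2, hpair]
          cases hb : (d == 0 && pvIsPairB c c2) <;> simp_all

-- ===== VERDICT (by name: the statement is the Claim_ definition above) =====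
theorem contains_top_level_bool_connective_py_spec : Claim_equal_contains_top_level_bool_connective_py := by
  intro expr _
  unfold Spec_contains_top_level_bool_connective_py contains_top_level_bool_connective_py contains_top_level_bool_connective_py_alt
  exact pv_loop_eq_scan _ _
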